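-- pv_equiv track=rewrite | github.com/Antho1212/Antho_Training | python/progra Bloc 1/tp progra/tp progra 5.py | determine_points
-- ===== SOURCE A (Python) =====
-- def determine_points(victim_list: list) -> int:
--     """
--     The function returns the amount of points used by the hunter determined by its kills
--
--     Parameters
--     ----------
--     victim_list : the list of killed things (list)
--
--     Returns
--     -------
--     result: the amount of points used by the hunter (int)
--     """
--     points = 0
--     victim_value = {'chicken': 10,
--                     'dog': 30,
--                     'cow': 50,
--                     'human': 80}
--
--     for victim in victim_list:
--         points += victim_value[victim]
--
--     return points
-- ===== SOURCE B (Python) =====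
-- def _total(seg, victim_value):
--     n = len(seg)
--     if n == 0:
--         return 0
--     if n == 1:
--         return victim_value[seg[0]]
--     mid = n // 2
--     return _total(seg[:mid], victim_value) + _total(seg[mid:], victim_value)
--
--
-- def determine_points(victim_list: list) -> int:
--     victim_value = {'chicken': 10,
--                     'dog': 30,
--                     'cow': 50,
--                     'human': 80}
--     return _total(victim_list, victim_value)
-- ===== Notes on version B (the rewrite author's own statement) =====
-- stated objective: alternative
-- what changed: B replaces A's left-to-right accumulator loop with a divide-and-conquer summation: it recursively splits the list in half and adds the point totals of the two halves, looking a victim up only at singleton leaves.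
import Mathlib
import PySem

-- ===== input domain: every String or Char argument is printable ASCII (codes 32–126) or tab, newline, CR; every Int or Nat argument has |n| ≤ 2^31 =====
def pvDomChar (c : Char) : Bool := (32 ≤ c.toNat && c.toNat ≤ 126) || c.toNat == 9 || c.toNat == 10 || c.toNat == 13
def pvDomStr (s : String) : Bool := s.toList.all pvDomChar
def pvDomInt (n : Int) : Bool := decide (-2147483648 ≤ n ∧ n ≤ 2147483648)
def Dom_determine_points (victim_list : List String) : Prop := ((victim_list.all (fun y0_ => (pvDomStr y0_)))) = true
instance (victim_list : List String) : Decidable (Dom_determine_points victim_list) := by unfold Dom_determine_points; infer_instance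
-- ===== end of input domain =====

-- B replaces A's accumulator loop by a divide-and-conquer summation (split in half, add the halves' totals); equivalence on lists of known kinds.


-- ===== PORT A =====
def pvVictimValue : PySem.Dict String Int :=
  PySem.Dict.ofList [("chicken", 10), ("dog", 30), ("cow", 50), ("human", 80)]

-- A: per-element loop, points += victim_value[victim] (KeyError on unknown kinds is excluded by Pre_)
def determine_points (victim_list : List String) : Int :=
  victim_list.foldl (fun points victim => points + pvVictimValue.getD victim 0) 0

-- ===== PORT B =====
-- midpoint and half-length facts, for the recursion's termination
lemma pv_mid_eq (L : Nat) : PySem.Int.floordiv (L : Int) 2 = ((L / 2 : Nat) : Int) := by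
  exact_mod_cast PySem.Int.floordiv_natCast L 2

lemma pv_take_half_lt (seg : List String) (h2 : 2 ≤ seg.length) :
    (seg.take (seg.length / 2)).length < seg.length := by
  simp [List.length_take]; omega

lemma pv_drop_half_lt (seg : List String) (h2 : 2 ≤ seg.length) :
    (seg.drop (seg.length / 2)).length < seg.length := by
  simp [List.length_drop]; omega

-- B's helper _total(seg, victim_value): split at n // 2, recurse on both halves
def pvTotal (seg : List String) : Int :=
  let n : Int := seg.length
  if n = 0 then 0
  else if n = 1 then pvVictimValue.getD ((PySem.List.pyGet? seg 0).getD "") 0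
  else
    let mid := PySem.Int.floordiv n 2
    pvTotal (PySem.List.slice seg none (some mid)) + pvTotal (PySem.List.slice seg (some mid) none)
termination_by seg.length
decreasing_by
  · have h2 : 2 ≤ seg.length := by omega
    rw [pv_mid_eq, PySem.List.slice_to_natCast]
    exact pv_take_half_lt seg h2
  · have h2 : 2 ≤ seg.length := by omega
    rw [pv_mid_eq, PySem.List.slice_from_natCast]
    exact pv_drop_half_lt seg h2

def determine_points_alt (victim_list : List String) : Int :=
  pvTotal victim_list

-- ===== PRECONDITION & SPEC =====
-- Pre_ excludes inputs containing a victim kind outside the value table, on which A raises KeyError.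
def Pre_determine_points (victim_list : List String) : Prop :=
  ∀ v ∈ victim_list, v ∈ ["chicken", "dog", "cow", "human"]
instance (victim_list : List String) : Decidable (Pre_determine_points victim_list) := by
  unfold Pre_determine_points; infer_instance

def pvWitness_determine_points : List String := ["dog", "chicken", "dog", "human"]

def Spec_determine_points (victim_list : List String) (out : Int) : Prop := out = determine_points_alt victim_list
instance (victim_list : List String) (out : Int) : Decidable (Spec_determine_points victim_list out) := by unfold Spec_determine_points; infer_instance

-- ===== CLAIM (what is proved, stated in full; the proofs are below) =====
def Claim_equal_determine_points : Prop := ∀ (victim_list : List String), Dom_determine_points victim_list → Pre_determine_points victim_list → Spec_determine_points victim_list (determine_points victim_list)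

-- ===== LEMMAS AND PROOFS =====

-- The divide-and-conquer total of any segment is the sum of its per-element values.
lemma pv_total_eq_sum (seg : List String) :
    pvTotal seg = (seg.map (fun v => pvVictimValue.getD v 0)).sum := by
  induction seg using pvTotal.induct with
  | case1 seg n h0 =>
    have h0' : (seg.length : Int) = 0 := h0
    have : seg = [] := List.length_eq_zero_iff.mp (by exact_mod_cast h0')
    simp [pvTotal, this]
  | case2 seg n h0 h1 =>
    have h1' : (seg.length : Int) = 1 := h1
    obtain ⟨x, hx⟩ := List.length_eq_one_iff.mp (show seg.length = 1 by exact_mod_cast h1')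
    subst hx
    simp [pvTotal, PySem.List.pyGet?, PySem.List.pyIdx?]
  | case3 seg n h0 h1 mid ih1 ih2 =>
    rw [pvTotal]
    simp only []
    rw [if_neg h0, if_neg h1, ih1, ih2]
    have hmid : mid = ((seg.length / 2 : Nat) : Int) := pv_mid_eq seg.length
    rw [hmid, PySem.List.slice_to_natCast, PySem.List.slice_from_natCast,
      ← List.sum_append, ← List.map_append, List.take_append_drop]

-- ===== VERDICT (by name: the statement is the Claim_ definition above) =====
theorem determine_points_spec : Claim_equal_determine_points := by
  intro xs _ _
  unfold Spec_determine_points determine_points determine_points_alt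
  rw [PySem.List.foldl_add, pv_total_eq_sum, zero_add]
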